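-- pv_equiv track=rewrite | github.com/oqlos/testql | testql/adapters/graphql/schema_introspection.py | _scan_balanced_braces
-- ===== SOURCE A (Python) =====
-- from typing import Optional
--
-- def _scan_balanced_braces(text: str, start: int) -> Optional[str]:
--     depth = 1
--     i = start
--     while i < len(text):
--         ch = text[i]
--         if ch == "{":
--             depth += 1
--         elif ch == "}":
--             depth -= 1
--             if depth == 0:
--                 return text[start:i]
--         i += 1
--     return None
-- ===== SOURCE B (Python) =====
-- from typing import Optional
--
-- def _scan_balanced_braces(text: str, start: int) -> Optional[str]:
--     depth = 1
--     i = start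
--     while True:
--         close_i = text.find("}", i)
--         if close_i == -1:
--             return None
--         open_i = text.find("{", i)
--         if open_i != -1 and open_i < close_i:
--             depth += 1
--             i = open_i + 1
--         else:
--             depth -= 1
--             if depth == 0:
--                 return text[start:close_i]
--             i = close_i + 1
-- ===== Notes on version B (the rewrite author's own statement) =====
-- stated objective: faster
-- what changed: Replaced the per-character while-loop with a brace-to-brace jump loop driven by str.find for '{' and '}', visiting only brace positions instead of every character.
-- outside the precondition, e.g. on _scan_balanced_braces('}x', -1): A returns '', B returns None; on _scan_balanced_braces('}', -5): A raises IndexError, B returns ''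
import Mathlib
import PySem

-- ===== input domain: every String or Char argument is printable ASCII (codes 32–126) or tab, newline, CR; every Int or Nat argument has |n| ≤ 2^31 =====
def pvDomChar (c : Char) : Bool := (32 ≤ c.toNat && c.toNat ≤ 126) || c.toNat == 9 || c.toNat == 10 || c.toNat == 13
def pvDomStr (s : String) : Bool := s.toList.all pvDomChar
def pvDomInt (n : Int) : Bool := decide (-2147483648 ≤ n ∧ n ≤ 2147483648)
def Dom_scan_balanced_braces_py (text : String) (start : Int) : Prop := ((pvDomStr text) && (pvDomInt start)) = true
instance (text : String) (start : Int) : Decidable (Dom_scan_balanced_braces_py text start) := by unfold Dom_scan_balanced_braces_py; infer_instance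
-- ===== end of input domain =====

-- B replaces A's per-character scan by brace-to-brace jumps with str.find (same O(n), measured
-- faster in a timing run: C-level find scans instead of a per-character Python loop);
-- equivalence is proved for scan positions start ≥ 0 (Pre_), the function's natural domain.

-- ===== PORT A =====
-- literal port of A's while-loop: depth/i state, pythonic indexing (pyGet?; none = IndexError, outside Pre_)
def pvLoopA (s : List Char) (start depth i : Int) : Option (List Char) :=
  if _h : i < (s.length : Int) then
    match PySem.List.pyGet? s i with
    | none => none  -- IndexError: A raises here (excluded by Pre_)
    | some ch =>
      if ch = '{' then pvLoopA s start (depth + 1) (i + 1)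
      else if ch = '}' then
        if depth - 1 = 0 then some (PySem.List.slice s (some start) (some i))
        else pvLoopA s start (depth - 1) (i + 1)
      else pvLoopA s start depth (i + 1)
  else none
termination_by ((s.length : Int) - i).toNat
decreasing_by all_goals (simp_wf; omega)

def scan_balanced_braces_py (text : String) (start : Int) : Option String :=
  (pvLoopA text.toList start 1 start).map String.ofList

-- ===== PORT B =====
-- literal port of Source B's while True loop; fuel = length + 2 is a totality guard only
-- (i strictly increases and stays ≤ length, so the fuel is never exhausted)
def pvLoopB (s : List Char) (start depth i : Int) : Nat → Option (List Char)
  | 0 => none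
  | fuel + 1 =>
    let close_i := PySem.Chars.findFrom s ['}'] i none
    if close_i = -1 then none
    else
      let open_i := PySem.Chars.findFrom s ['{'] i none
      if open_i ≠ -1 ∧ open_i < close_i then
        pvLoopB s start (depth + 1) (open_i + 1) fuel
      else
        if depth - 1 = 0 then some (PySem.List.slice s (some start) (some close_i))
        else pvLoopB s start (depth - 1) (close_i + 1) fuel

def scan_balanced_braces_py_alt (text : String) (start : Int) : Option String :=
  (pvLoopB text.toList start 1 start (text.toList.length + 2)).map String.ofList

-- ===== PRECONDITION & SPEC =====
-- Pre_ restricts start to the function's natural domain, nonnegative scan positions: for negative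
-- start A indexes via Python's negative-index wraparound (scanning the tail and then the whole text
-- again), an artefact of its implementation, and raises IndexError when start < -len(text).
def Pre_scan_balanced_braces_py (text : String) (start : Int) : Prop := 0 ≤ start
instance (text : String) (start : Int) : Decidable (Pre_scan_balanced_braces_py text start) := by unfold Pre_scan_balanced_braces_py; infer_instance
def pvWitness_scan_balanced_braces_py : String × Int := ("ab}c", 0)

def Spec_scan_balanced_braces_py (text : String) (start : Int) (out : Option String) : Prop := out = scan_balanced_braces_py_alt text start
instance (text : String) (start : Int) (out : Option String) : Decidable (Spec_scan_balanced_braces_py text start out) := by unfold Spec_scan_balanced_braces_py; infer_instance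

-- ===== CLAIM (what is proved, stated in full; the proofs are below) =====
def Claim_equal_scan_balanced_braces_py : Prop := ∀ (text : String) (start : Int), Dom_scan_balanced_braces_py text start → Pre_scan_balanced_braces_py text start → Spec_scan_balanced_braces_py text start (scan_balanced_braces_py text start)

-- ===== LEMMAS AND PROOFS =====

-- [c] is a prefix of l iff l starts with c
lemma pvSingleton_prefix {l : List Char} {c : Char} : [c] <+: l ↔ l.head? = some c := by
  constructor
  · rintro ⟨t, rfl⟩; rfl
  · intro h; cases l with
    | nil => simp at h
    | cons a t => simp at h; subst h; exact ⟨t, rfl⟩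

-- s[m] = c → [c] <+: s.drop m
lemma pvPrefix_drop {s : List Char} {m : Nat} (h : m < s.length) {c : Char} (hc : s[m] = c) :
    [c] <+: s.drop m := by
  rw [List.drop_eq_getElem_cons h, pvSingleton_prefix]; simp [hc]


-- s[m] is in s.drop a for a ≤ m
lemma pvMem_drop {s : List Char} {a m : Nat} (ha : a ≤ m) (hm : m < s.length) : s[m] ∈ s.drop a := by
  have h1 : m - a < (s.drop a).length := by simp [List.length_drop]; omega
  have h2 : (s.drop a)[m - a] = s[m] := by
    rw [List.getElem_drop]; congr 1; omega
  rw [← h2]; exact List.getElem_mem h1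

-- findFrom from a position past the end is -1
lemma pvFindFrom_big (s sub : List Char) (a : Int) (h : (s.length : Int) < a) :
    PySem.Chars.findFrom s sub a none = -1 := by
  simp only [PySem.Chars.findFrom]
  have h0 : ¬ (a < 0) := by omega
  simp only [h0, if_false, if_pos h]

-- A's loop returns none when no '}' occurs at or after a
lemma pvLoopA_none (s : List Char) (start depth : Int) :
    ∀ k a, s.length - a ≤ k → (∀ m (_ : m < s.length), a ≤ m → s[m] ≠ '}') →
    pvLoopA s start depth (a : Int) = none := by
  intro k
  induction k generalizing depth with
  | zero =>
    intro a ha _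
    rw [pvLoopA]
    have : ¬ ((a : Int) < (s.length : Int)) := by omega
    simp [this]
  | succ k ih =>
    intro a ha hno
    rw [pvLoopA]
    by_cases hlt : (a : Int) < (s.length : Int)
    · have halen : a < s.length := by omega
      rw [dif_pos hlt]
      rw [PySem.List.pyGet?_natCast]
      have hget : s[a]? = some s[a] := List.getElem?_eq_getElem halen
      rw [hget]
      have hne : s[a] ≠ '}' := hno a halen le_rfl
      have hrec : ∀ d : Int, pvLoopA s start d ((a : Int) + 1) = none := by
        intro d
        have : ((a : Int) + 1) = ((a + 1 : Nat) : Int) := by push_cast; ring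
        rw [this]
        exact ih d (a + 1) (by omega) (fun m hm hm2 => hno m hm (by omega))
      by_cases hbr : s[a] = '{'
      · simp only [hbr, if_true]; exact hrec (depth + 1)
      · simp only [if_neg hbr, if_neg hne]; exact hrec depth
    · simp [hlt]

-- A's loop skips positions that hold neither brace
lemma pvLoopA_skip (s : List Char) (start depth : Int) :
    ∀ k a b, b - a ≤ k → a ≤ b → b ≤ s.length →
    (∀ m (_ : m < s.length), a ≤ m → m < b → s[m] ≠ '{' ∧ s[m] ≠ '}') →
    pvLoopA s start depth (a : Int) = pvLoopA s start depth (b : Int) := by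
  intro k
  induction k with
  | zero =>
    intro a b h1 h2 _ _
    have hab : a = b := by omega
    subst hab; rfl
  | succ k ih =>
    intro a b h1 h2 hb hmid
    rcases Nat.eq_or_lt_of_le h2 with rfl | hab
    · rfl
    · have halen : a < s.length := by omega
      rw [pvLoopA]
      have hlt : (a : Int) < (s.length : Int) := by omega
      rw [dif_pos hlt, PySem.List.pyGet?_natCast, List.getElem?_eq_getElem halen]
      obtain ⟨h1', h2'⟩ := hmid a halen le_rfl hab
      simp only [if_neg h1', if_neg h2']
      have : ((a : Int) + 1) = ((a + 1 : Nat) : Int) := by push_cast; ring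
      rw [this]
      exact ih (a + 1) b (by omega) (by omega) hb
        (fun m hm hm2 hm3 => hmid m hm (by omega) hm3)

-- main lemma: for a ≥ 0 the two loops agree, given enough fuel
lemma pvLoop_agree (s : List Char) (start : Int) :
    ∀ fuel (a : Nat) (depth : Int), s.length - a < fuel →
    pvLoopA s start depth (a : Int) = pvLoopB s start depth (a : Int) fuel := by
  intro fuel
  induction fuel with
  | zero => intro a depth h; omega
  | succ fuel ih =>
    intro a depth _hfuel
    by_cases halen : a ≤ s.length
    · -- the close/open searches
      set j := PySem.Chars.findFrom s ['}'] (a : Int) with hj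
      set o := PySem.Chars.findFrom s ['{'] (a : Int) with ho
      rw [pvLoopB]
      by_cases hjneg : j = -1
      · -- no closing brace after a: both none
        rw [if_pos hjneg]
        have hno : ¬ ['}'] <:+: s.drop a :=
          (PySem.Chars.findFrom_natCast_eq_neg_one_iff s ['}'] a halen).1 hjneg
        rw [List.singleton_infix_iff] at hno
        exact pvLoopA_none s start depth (s.length - a) a le_rfl
          (fun m hm ham hc => hno (by rw [← hc]; exact pvMem_drop ham hm))
      · rw [if_neg hjneg]
        obtain ⟨haj, hpre, hmin⟩ := PySem.Chars.findFrom_natCast_spec s ['}'] a halen (by rw [← hj]; exact hjneg)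
        rw [← hj] at haj hpre hmin
        have hjlen : j.toNat < s.length := by
          rcases hpre with ⟨t, ht⟩
          have := congrArg List.length ht
          simp [List.length_drop] at this; omega
        have hj0 : (0 : Int) ≤ j := le_trans (by omega) haj
        have hjchar : s[j.toNat] = '}' := by
          have h := (pvSingleton_prefix).1 hpre
          rw [List.drop_eq_getElem_cons hjlen, List.head?_cons] at h
          exact Option.some.inj h
        have hjmin : ∀ m (h3 : m < s.length), a ≤ m → m < j.toNat → s[m] ≠ '}' := by
          intro m h3 h1 h2 hc
          exact hmin m h1 h2 (pvPrefix_drop h3 hc)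
        by_cases hbranch : o ≠ -1 ∧ o < j
        · -- jump to the opening brace
          rw [if_pos hbranch]
          obtain ⟨hao, hopre, homin⟩ := PySem.Chars.findFrom_natCast_spec s ['{'] a halen (by rw [← ho]; exact hbranch.1)
          rw [← ho] at hao hopre homin
          have holen : o.toNat < s.length := by omega
          have ho0 : (0 : Int) ≤ o := le_trans (by omega) hao
          have hochar : s[o.toNat] = '{' := by
            have h := (pvSingleton_prefix).1 hopre
            rw [List.drop_eq_getElem_cons holen, List.head?_cons] at h
            exact Option.some.inj h
          have homin' : ∀ m (h3 : m < s.length), a ≤ m → m < o.toNat → s[m] ≠ '{' := by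
            intro m h3 h1 h2 hc
            exact homin m h1 h2 (pvPrefix_drop h3 hc)
          have hskip := pvLoopA_skip s start depth (o.toNat - a) a o.toNat (by omega) (by omega)
            (by omega)
            (fun m hm h1 h2 => ⟨homin' m hm h1 h2, hjmin m hm h1 (by omega)⟩)
          rw [hskip, pvLoopA]
          have hlt : ((o.toNat : Nat) : Int) < (s.length : Int) := by omega
          rw [dif_pos hlt, PySem.List.pyGet?_natCast, List.getElem?_eq_getElem holen]
          simp only [hochar, Char.reduceEq, reduceIte]
          have hcast : ((o.toNat : Nat) : Int) + 1 = ((o.toNat + 1 : Nat) : Int) := by push_cast; ring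
          have hcast2 : o + 1 = ((o.toNat + 1 : Nat) : Int) := by omega
          rw [hcast, hcast2, ih (o.toNat + 1) (depth + 1) (by omega)]
        · -- jump to the closing brace
          rw [if_neg hbranch]
          have hnoopen : ∀ m (h3 : m < s.length), a ≤ m → m < j.toNat → s[m] ≠ '{' := by
            intro m h3 h1 h2 hc
            rcases not_and_or.1 hbranch with h | h
            · push_neg at h
              have : ¬ ['{'] <:+: s.drop a :=
                (PySem.Chars.findFrom_natCast_eq_neg_one_iff s ['{'] a halen).1 (by rw [ho] at h; exact h)
              rw [List.singleton_infix_iff] at this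
              exact this (by rw [← hc]; exact pvMem_drop h1 h3)
            · push_neg at h
              obtain ⟨hao, _, homin⟩ := PySem.Chars.findFrom_natCast_spec s ['{'] a halen
                (by rw [← ho]; intro hx; rw [hx] at h; omega)
              rw [← ho] at hao homin
              exact homin m h1 (by omega) (pvPrefix_drop h3 hc)
          have hskip := pvLoopA_skip s start depth (j.toNat - a) a j.toNat (by omega) (by omega)
            (by omega)
            (fun m hm h1 h2 => ⟨hnoopen m hm h1 h2, hjmin m hm h1 h2⟩)
          rw [hskip, pvLoopA]
          have hlt : ((j.toNat : Nat) : Int) < (s.length : Int) := by omega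
          rw [dif_pos hlt, PySem.List.pyGet?_natCast, List.getElem?_eq_getElem hjlen]
          simp only [hjchar, Char.reduceEq, reduceIte]
          by_cases hd : depth - 1 = 0
          · have : ((j.toNat : Nat) : Int) = j := by omega
            simp only [if_pos hd, this]
            rw [hj]
          · simp only [if_neg hd]
            have hcast : ((j.toNat : Nat) : Int) + 1 = ((j.toNat + 1 : Nat) : Int) := by push_cast; ring
            have hcast2 : j + 1 = ((j.toNat + 1 : Nat) : Int) := by omega
            rw [hcast, hcast2, ih (j.toNat + 1) (depth - 1) (by omega)]
    · -- a past the end: A's guard fails, B's find returns -1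
      rw [pvLoopB]
      have : PySem.Chars.findFrom s ['}'] (a : Int) none = -1 := pvFindFrom_big s ['}'] a (by omega)
      rw [if_pos this, pvLoopA]
      have : ¬ ((a : Int) < (s.length : Int)) := by omega
      simp [this]

-- ===== VERDICT (by name: the statement is the Claim_ definition above) =====
theorem scan_balanced_braces_py_spec : Claim_equal_scan_balanced_braces_py := by
  intro text start _hdom hpre
  unfold Spec_scan_balanced_braces_py scan_balanced_braces_py scan_balanced_braces_py_alt
  have h0 : (0 : Int) ≤ start := hpre
  have hcast : start = ((start.toNat : Nat) : Int) := by omega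
  rw [hcast, pvLoop_agree text.toList ((start.toNat : Nat) : Int) (text.toList.length + 2) start.toNat 1 (by omega)]
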